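-- pv_equiv track=rewrite | github.com/einhornus/CrazyGo | server/game/go/go_logic_utils.py | find_points_reachable_from_color
-- ===== SOURCE A (Python) =====
-- def find_points_reachable_from_color(board, color):
--     n = len(board)
--     visited = [[False for i in range(n)] for j in range(n)]
--     for i in range(n):
--         for j in range(n):
--             if board[i][j] == color:
--                 if not visited[i][j]:
--                     dfs(i, j, visited, board, color, True)
--     return visited
--
-- def dfs(x, y, visited, board, color, prev):
--     visited[x][y] = True
--     dx = [0, 1, 0, -1]
--     dy = [-1, 0, 1, 0]
--     for i in range(len(dx)):
--         newX = x+dx[i]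
--         newY = y+dy[i]
--         if 0 <= newX < len(visited):
--             if 0 <= newY < len(visited):
--                 if not visited[newX][newY]:
--                     if board[newX][newY] == board[x][y] or (prev and board[x][y] == color):
--                         dfs(newX, newY, visited, board, color, prev)
-- ===== SOURCE B (Python) =====
-- def find_points_reachable_from_color(board, color):
--     # Iterative fixed-point relaxation instead of recursive DFS: seed every
--     # cell equal to color, then sweep the board repeatedly, marking any cell
--     # that has an already-marked neighbour allowed to spread into it, until a
--     # full sweep changes nothing.
--     n = len(board)
--     visited = [[board[i][j] == color for j in range(n)] for i in range(n)]
--     changed = True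
--     while changed:
--         changed = False
--         for i in range(n):
--             for j in range(n):
--                 if not visited[i][j] and any(
--                     0 <= ni < n and 0 <= nj < n and visited[ni][nj]
--                     and (board[i][j] == board[ni][nj] or board[ni][nj] == color)
--                     for ni, nj in ((i, j - 1), (i + 1, j), (i, j + 1), (i - 1, j))
--                 ):
--                     visited[i][j] = True
--                     changed = True
--     return visited
-- ===== Notes on version B (the rewrite author's own statement) =====
-- stated objective: alternative
-- what changed: Replaces the recursive per-seed DFS with an iterative fixed-point relaxation: all color cells are marked up front, then whole-board sweeps mark any cell with an already-marked neighbour allowed to spread into it, repeated until a sweep changes nothing, so there is no recursion (and no deep-recursion risk on large connected boards).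
import Mathlib
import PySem

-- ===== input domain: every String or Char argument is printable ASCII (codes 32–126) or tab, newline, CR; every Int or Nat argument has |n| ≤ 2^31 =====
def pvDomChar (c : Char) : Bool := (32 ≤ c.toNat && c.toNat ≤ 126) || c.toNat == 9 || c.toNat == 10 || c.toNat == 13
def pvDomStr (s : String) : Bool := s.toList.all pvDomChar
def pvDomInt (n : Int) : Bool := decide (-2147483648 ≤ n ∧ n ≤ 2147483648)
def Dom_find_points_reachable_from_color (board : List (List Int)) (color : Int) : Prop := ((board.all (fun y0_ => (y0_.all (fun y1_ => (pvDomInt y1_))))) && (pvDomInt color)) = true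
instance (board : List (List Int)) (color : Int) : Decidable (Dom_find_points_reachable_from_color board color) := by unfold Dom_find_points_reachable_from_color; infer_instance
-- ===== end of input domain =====

-- B replaces A's recursive per-seed DFS by an iterative fixed-point relaxation (whole-board
-- sweeps that mark any cell with an already-marked neighbour allowed to spread into it, until
-- a sweep changes nothing); same boolean grid, no recursion. A mutates nothing observable:
-- the equivalence is about the return value.

-- ===== PORT A =====
-- board[x][y] (all uses are guarded in range / admitted by Pre_, so the default is never the result)
def pvGB (board : List (List Int)) (x y : Int) : Int :=
  PySem.List.pyGetD (PySem.List.pyGetD board x []) y 0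
-- visited[x][y]
def pvGV (v : List (List Bool)) (x y : Int) : Bool :=
  PySem.List.pyGetD (PySem.List.pyGetD v x []) y false
-- visited[x][y] = True
def pvSV (v : List (List Bool)) (x y : Int) : List (List Bool) :=
  PySem.List.pySetD v x (PySem.List.pySetD (PySem.List.pyGetD v x []) y true)

-- the (dx[i], dy[i]) pairs of A's dfs, in loop order
def pvDirs : List (Int × Int) := [(0, -1), (1, 0), (0, 1), (-1, 0)]

mutual
-- dfs(x, y, visited, board, color, prev), returning the mutated visited.
-- Totality guards (never false on an actual call): the entry `if` (Python's dfs is only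
-- invoked on in-range unvisited cells) and the fuel (recursion depth ≤ cells marked < fuel).
def pvDfs (fuel : Nat) (x y : Int) (visited : List (List Bool)) (board : List (List Int))
    (color : Int) (prev : Bool) : List (List Bool) :=
  match fuel with
  | 0 => visited
  | f + 1 =>
    if 0 ≤ x ∧ x.toNat < visited.length ∧ 0 ≤ y ∧
        y.toNat < (visited.getD x.toNat []).length ∧ pvGV visited x y = false then
      pvDfsNbrs f x y (pvSV visited x y) board color prev pvDirs
    else visited
  termination_by (fuel, 0)
-- the `for i in range(len(dx))` loop of dfs
def pvDfsNbrs (f : Nat) (x y : Int) (visited : List (List Bool)) (board : List (List Int))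
    (color : Int) (prev : Bool) : List (Int × Int) → List (List Bool)
  | [] => visited
  | d :: ds =>
    let newX := x + d.1
    let newY := y + d.2
    let v' :=
      if 0 ≤ newX ∧ newX < PySem.List.len visited ∧ 0 ≤ newY ∧ newY < PySem.List.len visited ∧
          pvGV visited newX newY = false ∧
          (pvGB board newX newY == pvGB board x y || (prev && (pvGB board x y == color))) = true
      then pvDfs f newX newY visited board color prev
      else visited
    pvDfsNbrs f x y v' board color prev ds
  termination_by ds => (f, ds.length + 1)
end

def find_points_reachable_from_color (board : List (List Int)) (color : Int) : List (List Bool) :=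
  let n := board.length
  let visited := (PySem.List.pyRange 0 (n : Int) 1).map
    (fun _ => (PySem.List.pyRange 0 (n : Int) 1).map (fun _ => false))
  (PySem.List.pyRange 0 (n : Int) 1).foldl (fun v i =>
    (PySem.List.pyRange 0 (n : Int) 1).foldl (fun v j =>
      if (pvGB board i j == color) = true ∧ pvGV v i j = false then
        pvDfs (n * n + 1) i j v board color true
      else v) v) visited

-- ===== PORT B =====
-- the four neighbour candidates of (i, j), in Source B's order
def pvNbrs (i j : Int) : List (Int × Int) := [(i, j - 1), (i + 1, j), (i, j + 1), (i - 1, j)]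

-- one full sweep of the board (the body of B's while-loop); the flag is `changed`.
-- The two structural bounds in the `if` are a totality guard (the grid is always n×n here).
def pvPass (board : List (List Int)) (color : Int) (n : Nat) (s0 : List (List Bool) × Bool) :
    List (List Bool) × Bool :=
  (PySem.List.pyRange 0 (n : Int) 1).foldl (fun s i =>
    (PySem.List.pyRange 0 (n : Int) 1).foldl (fun s j =>
      if 0 ≤ i ∧ i.toNat < s.1.length ∧ 0 ≤ j ∧ j.toNat < (s.1.getD i.toNat []).length ∧
          pvGV s.1 i j = false ∧
          ((pvNbrs i j).any (fun p =>
            decide (0 ≤ p.1) && decide (p.1 < (n : Int)) && decide (0 ≤ p.2) &&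
            decide (p.2 < (n : Int)) && pvGV s.1 p.1 p.2 &&
            (pvGB board i j == pvGB board p.1 p.2 || pvGB board p.1 p.2 == color))) = true then
        (pvSV s.1 i j, true)
      else s) s) s0

-- `while changed:`; the fuel is a totality guard (every continued round marks a fresh cell,
-- so n*n+1 rounds always reach the fixed point)
def pvLoop (fuel : Nat) (board : List (List Int)) (color : Int) (n : Nat)
    (v : List (List Bool)) : List (List Bool) :=
  match fuel with
  | 0 => v
  | f + 1 =>
    let r := pvPass board color n (v, false)
    if r.2 then pvLoop f board color n r.1 else r.1

def find_points_reachable_from_color_alt (board : List (List Int)) (color : Int) : List (List Bool) :=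
  let n := board.length
  let visited := (PySem.List.pyRange 0 (n : Int) 1).map
    (fun i => (PySem.List.pyRange 0 (n : Int) 1).map (fun j => pvGB board i j == color))
  pvLoop (n * n + 1) board color n visited

-- ===== PRECONDITION & SPEC =====
-- Pre_ excludes exactly the boards on which Python A raises IndexError: a row shorter than
-- len(board) (the row scans board[i][j] for all j < len(board)).
def Pre_find_points_reachable_from_color (board : List (List Int)) (color : Int) : Prop :=
  ∀ r ∈ board, board.length ≤ r.length
instance (board : List (List Int)) (color : Int) :
    Decidable (Pre_find_points_reachable_from_color board color) := by
  unfold Pre_find_points_reachable_from_color; infer_instance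

def pvWitness_find_points_reachable_from_color : List (List Int) × Int :=
  ([[1, 0], [0, 1]], 1)

def Spec_find_points_reachable_from_color (board : List (List Int)) (color : Int)
    (out : List (List Bool)) : Prop := out = find_points_reachable_from_color_alt board color
instance (board : List (List Int)) (color : Int) (out : List (List Bool)) :
    Decidable (Spec_find_points_reachable_from_color board color out) := by
  unfold Spec_find_points_reachable_from_color; infer_instance

-- ===== CLAIM (what is proved, stated in full; the proofs are below) =====
def Claim_equal_find_points_reachable_from_color : Prop :=
  ∀ (board : List (List Int)) (color : Int),
    Dom_find_points_reachable_from_color board color →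
    Pre_find_points_reachable_from_color board color →
    Spec_find_points_reachable_from_color board color
      (find_points_reachable_from_color board color)

-- ===== LEMMAS AND PROOFS =====

-- ---- bridges from the PySem indexing primitives to getD/toNat form ----

theorem pvPyGetD_nonneg {α : Type} (xs : List α) (x : Int) (d : α) (h : 0 ≤ x) :
    PySem.List.pyGetD xs x d = xs.getD x.toNat d := by
  obtain ⟨n, rfl⟩ := Int.eq_ofNat_of_zero_le h
  rw [PySem.List.pyGetD_natCast, Int.toNat_natCast]

-- proof-side views of the grid primitives
def pvgv (v : List (List Bool)) (x y : Int) : Bool := (v.getD x.toNat []).getD y.toNat false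
def pvsv (v : List (List Bool)) (x y : Int) : List (List Bool) :=
  v.set x.toNat ((v.getD x.toNat []).set y.toNat true)

theorem pvGV_eq (v : List (List Bool)) (x y : Int) (hx : 0 ≤ x) (hy : 0 ≤ y) :
    pvGV v x y = pvgv v x y := by
  simp [pvGV, pvgv, pvPyGetD_nonneg _ _ _ hx, pvPyGetD_nonneg _ _ _ hy]

theorem pvSV_eq (v : List (List Bool)) (x y : Int) (hx : 0 ≤ x) (hy : 0 ≤ y) :
    pvSV v x y = pvsv v x y := by
  simp [pvSV, pvsv, PySem.List.pySetD_of_nonneg _ _ hx, PySem.List.pySetD_of_nonneg _ _ hy,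
    pvPyGetD_nonneg _ _ _ hx]

theorem pvgv_congr (v : List (List Bool)) {x y x' y' : Int} (hx : x.toNat = x'.toNat)
    (hy : y.toNat = y'.toNat) : pvgv v x y = pvgv v x' y' := by simp [pvgv, hx, hy]

-- ---- shapes, marked-set inclusion, false-cell count ----

def pvInB (n : Nat) (x y : Int) : Prop := 0 ≤ x ∧ x < (n : Int) ∧ 0 ≤ y ∧ y < (n : Int)

def pvShape (n : Nat) (v : List (List Bool)) : Prop :=
  v.length = n ∧ ∀ k : Nat, k < n → (v.getD k []).length = n

def pvSub (v w : List (List Bool)) : Prop := ∀ x y : Int, pvgv v x y = true → pvgv w x y = true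

def pvCf (v : List (List Bool)) : Nat := (v.map (fun r => r.count false)).sum

def pvPres (v w : List (List Bool)) : Prop :=
  pvSub v w ∧ pvCf w ≤ pvCf v ∧ w.length = v.length ∧
    ∀ k : Nat, (w.getD k []).length = (v.getD k []).length

theorem pvPres_refl (v : List (List Bool)) : pvPres v v :=
  ⟨fun _ _ h => h, le_refl _, rfl, fun _ => rfl⟩

theorem pvPres_trans {u v w : List (List Bool)} (h1 : pvPres u v) (h2 : pvPres v w) :
    pvPres u w :=
  ⟨fun x y h => h2.1 x y (h1.1 x y h), le_trans h2.2.1 h1.2.1, h2.2.2.1.trans h1.2.2.1,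
    fun k => (h2.2.2.2 k).trans (h1.2.2.2 k)⟩

theorem pvShape_of_pres {n : Nat} {v w : List (List Bool)} (hS : pvShape n v)
    (hP : pvPres v w) : pvShape n w :=
  ⟨hP.2.2.1.trans hS.1, fun k hk => (hP.2.2.2 k).trans (hS.2 k hk)⟩

theorem pvGetD_set {α : Type} (l : List α) (i j : Nat) (a d : α) :
    (l.set i a).getD j d = if i = j ∧ i < l.length then a else l.getD j d := by
  rw [List.getD_eq_getElem?_getD, List.getElem?_set, List.getD_eq_getElem?_getD]
  by_cases h1 : i = j
  · subst h1
    by_cases h2 : i < l.length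
    · simp [h2]
    · rw [List.getElem?_eq_none (by omega : l.length ≤ i)]
      simp [h2]
  · simp [h1]

theorem pvgv_pvsv_char (v : List (List Bool)) (x y a b : Int) :
    pvgv (pvsv v x y) a b =
      if x.toNat = a.toNat ∧ y.toNat = b.toNat ∧ x.toNat < v.length ∧
          y.toNat < (v.getD x.toNat []).length then true
      else pvgv v a b := by
  simp only [pvgv, pvsv]
  rw [pvGetD_set]
  by_cases h1 : x.toNat = a.toNat ∧ x.toNat < v.length
  · rw [if_pos h1, pvGetD_set, ← h1.1]
    -- a.toNat has been rewritten to x.toNat everywhere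
    by_cases h2 : y.toNat = b.toNat ∧ y.toNat < (v.getD x.toNat []).length
    · rw [if_pos h2, if_pos ⟨rfl, h2.1, h1.2, h2.2⟩]
    · rw [if_neg h2, if_neg (by tauto)]
  · rw [if_neg h1, if_neg (by tauto)]

theorem pvgv_pvsv_mono {v : List (List Bool)} {x y a b : Int} (h : pvgv v a b = true) :
    pvgv (pvsv v x y) a b = true := by
  rw [pvgv_pvsv_char]
  split_ifs <;> simp [h]

theorem pvgv_pvsv_self {v : List (List Bool)} {x y : Int} (hx : x.toNat < v.length)
    (hy : y.toNat < (v.getD x.toNat []).length) : pvgv (pvsv v x y) x y = true := by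
  rw [pvgv_pvsv_char, if_pos ⟨rfl, rfl, hx, hy⟩]

theorem pvgv_pvsv_cases {v : List (List Bool)} {x y a b : Int}
    (h : pvgv (pvsv v x y) a b = true) :
    pvgv v a b = true ∨ (a.toNat = x.toNat ∧ b.toNat = y.toNat) := by
  rw [pvgv_pvsv_char] at h
  split_ifs at h with hc
  · exact Or.inr ⟨hc.1.symm, hc.2.1.symm⟩
  · exact Or.inl h

theorem pvsv_length (v : List (List Bool)) (x y : Int) : (pvsv v x y).length = v.length := by
  simp [pvsv]

theorem pvsv_row_length (v : List (List Bool)) (x y : Int) (k : Nat) :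
    ((pvsv v x y).getD k []).length = (v.getD k []).length := by
  simp only [pvsv]
  rw [pvGetD_set]
  split_ifs with h
  · rw [← h.1, List.length_set]
  · rfl

theorem pvCf_set_aux (v : List (List Bool)) (i : Nat) (r : List Bool) (hi : i < v.length) :
    pvCf (v.set i r) + (v.getD i []).count false = pvCf v + r.count false := by
  induction v generalizing i with
  | nil => simp at hi
  | cons hd tl ih =>
    cases i with
    | zero =>
      simp only [List.set_cons_zero, pvCf, List.map_cons, List.sum_cons, List.getD_cons_zero]
      omega
    | succ i =>
      have := ih i (by simpa using hi)
      simp only [pvCf, List.set_cons_succ, List.map_cons, List.sum_cons,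
        List.getD_cons_succ] at this ⊢
      omega

theorem pvCf_pvsv_le (v : List (List Bool)) (x y : Int) : pvCf (pvsv v x y) ≤ pvCf v := by
  by_cases hx : x.toNat < v.length
  · have h := pvCf_set_aux v x.toNat ((v.getD x.toNat []).set y.toNat true) hx
    have hc : ((v.getD x.toNat []).set y.toNat true).count false ≤
        (v.getD x.toNat []).count false := by
      by_cases hy : y.toNat < (v.getD x.toNat []).length
      · rw [List.count_set hy]
        split_ifs <;> first | omega | simp_all
      · rw [List.set_eq_of_length_le (by omega)]
    simp only [pvsv]
    omega
  · simp only [pvsv]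
    rw [List.set_eq_of_length_le (by omega)]

theorem pvCf_pvsv_lt {v : List (List Bool)} {x y : Int} (hx : x.toNat < v.length)
    (hy : y.toNat < (v.getD x.toNat []).length) (h : pvgv v x y = false) :
    pvCf (pvsv v x y) < pvCf v := by
  have hset := pvCf_set_aux v x.toNat ((v.getD x.toNat []).set y.toNat true) hx
  have hc : ((v.getD x.toNat []).set y.toNat true).count false <
      (v.getD x.toNat []).count false := by
    rw [List.count_set hy]
    have hmm : (v.getD x.toNat [])[y.toNat]'hy = false := by
      rw [← List.getD_eq_getElem _ false hy]
      simpa [pvgv] using h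
    have hpos : 0 < (v.getD x.toNat []).count false :=
      List.count_pos_iff.2 (hmm ▸ List.getElem_mem hy)
    split_ifs <;> first | omega | simp_all
  simp only [pvsv]
  omega

theorem pvPres_pvsv (v : List (List Bool)) (x y : Int) : pvPres v (pvsv v x y) :=
  ⟨fun _ _ h => pvgv_pvsv_mono h, pvCf_pvsv_le v x y, pvsv_length v x y,
    fun k => pvsv_row_length v x y k⟩

theorem pvSub_sv_of_mem {T v : List (List Bool)} {x y : Int} (hSub : pvSub v T)
    (hT : pvgv T x y = true) : pvSub (pvsv v x y) T := by
  intro a b h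
  rcases pvgv_pvsv_cases h with h' | ⟨ha, hb⟩
  · exact hSub a b h'
  · rw [pvgv_congr T ha hb]
    exact hT

theorem pvCf_le_sq {n : Nat} {v : List (List Bool)} (hS : pvShape n v) : pvCf v ≤ n * n := by
  have hrow : ∀ r ∈ v, r.count false ≤ n := by
    intro r hr
    obtain ⟨k, hk, rfl⟩ := List.mem_iff_getElem.1 hr
    have hkn : k < n := hS.1 ▸ hk
    have := hS.2 k hkn
    rw [List.getD_eq_getElem _ _ hk] at this
    calc v[k].count false ≤ v[k].length := List.count_le_length
      _ = n := this
  calc pvCf v ≤ (v.map (fun r => r.count false)).length * n := by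
        apply List.sum_le_card_nsmul
        intro x hx
        obtain ⟨r, hr, rfl⟩ := List.mem_map.1 hx
        exact hrow r hr
    _ = n * n := by rw [List.length_map, hS.1, Nat.mul_comm]

-- ---- the iteration space of both double loops, flattened ----

def pvCells (n : Nat) : List (Nat × Nat) :=
  (List.range n).flatMap (fun i => (List.range n).map (fun j => (i, j)))

theorem mem_pvCells {n : Nat} {p : Nat × Nat} : p ∈ pvCells n ↔ p.1 < n ∧ p.2 < n := by
  constructor
  · intro h
    simp only [pvCells, List.mem_flatMap, List.mem_map, List.mem_range] at h
    obtain ⟨i, hi, j, hj, rfl⟩ := h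
    exact ⟨hi, hj⟩
  · intro ⟨h1, h2⟩
    simp only [pvCells, List.mem_flatMap, List.mem_map, List.mem_range]
    exact ⟨p.1, h1, p.2, h2, rfl⟩

theorem pvFoldl_nested {α β γ : Type} (L1 : List β) (L2 : List γ) (g : α → β → γ → α)
    (v : α) :
    L1.foldl (fun v i => L2.foldl (fun v j => g v i j) v) v
      = (L1.flatMap (fun i => L2.map (fun j => (i, j)))).foldl (fun v p => g v p.1 p.2) v := by
  induction L1 generalizing v with
  | nil => rfl
  | cons i L ih => simp [List.flatMap_cons, List.foldl_append, List.foldl_map, ih]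

-- ---- the two loop bodies as functions of one (i, j) cell ----

def pvStepA (b : List (List Int)) (c : Int) (n : Nat) (v : List (List Bool)) (p : Nat × Nat) :
    List (List Bool) :=
  if (pvGB b p.1 p.2 == c) = true ∧ pvGV v p.1 p.2 = false then
    pvDfs (n * n + 1) p.1 p.2 v b c true
  else v

def pvStepB (b : List (List Int)) (c : Int) (n : Nat) (s : List (List Bool) × Bool)
    (p : Nat × Nat) : List (List Bool) × Bool :=
  if 0 ≤ (p.1 : Int) ∧ (p.1 : Int).toNat < s.1.length ∧ 0 ≤ (p.2 : Int) ∧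
      (p.2 : Int).toNat < (s.1.getD (p.1 : Int).toNat []).length ∧
      pvGV s.1 p.1 p.2 = false ∧
      ((pvNbrs p.1 p.2).any (fun q =>
        decide (0 ≤ q.1) && decide (q.1 < (n : Int)) && decide (0 ≤ q.2) &&
        decide (q.2 < (n : Int)) && pvGV s.1 q.1 q.2 &&
        (pvGB b p.1 p.2 == pvGB b q.1 q.2 || pvGB b q.1 q.2 == c))) = true then
    (pvSV s.1 p.1 p.2, true)
  else s

def pvV0 (n : Nat) : List (List Bool) :=
  (List.range n).map (fun _ => (List.range n).map (fun _ => false))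

def pvG0 (b : List (List Int)) (c : Int) (n : Nat) : List (List Bool) :=
  (List.range n).map (fun i : Nat => (List.range n).map (fun j : Nat => pvGB b (i : Int) (j : Int) == c))

theorem pvPortA_eq (b : List (List Int)) (c : Int) :
    find_points_reachable_from_color b c
      = (pvCells b.length).foldl (pvStepA b c b.length) (pvV0 b.length) := by
  unfold pvV0
  unfold find_points_reachable_from_color
  simp only [PySem.List.pyRange_zero_natCast, List.foldl_map, List.map_map, Function.comp_def]
  exact pvFoldl_nested (List.range b.length) (List.range b.length)
    (fun v i j => if (pvGB b i j == c) = true ∧ pvGV v i j = false then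
      pvDfs (b.length * b.length + 1) i j v b c true else v) _

theorem pvPassB_eq (b : List (List Int)) (c : Int) (n : Nat) (s : List (List Bool) × Bool) :
    pvPass b c n s = (pvCells n).foldl (pvStepB b c n) s := by
  unfold pvPass
  simp only [PySem.List.pyRange_zero_natCast, List.foldl_map]
  exact pvFoldl_nested (List.range n) (List.range n)
    (fun s (i j : Nat) =>
      if 0 ≤ (i : Int) ∧ (i : Int).toNat < s.1.length ∧ 0 ≤ (j : Int) ∧
          (j : Int).toNat < (s.1.getD (i : Int).toNat []).length ∧
          pvGV s.1 i j = false ∧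
          ((pvNbrs i j).any (fun q =>
            decide (0 ≤ q.1) && decide (q.1 < (n : Int)) && decide (0 ≤ q.2) &&
            decide (q.2 < (n : Int)) && pvGV s.1 q.1 q.2 &&
            (pvGB b i j == pvGB b q.1 q.2 || pvGB b q.1 q.2 == c))) = true then
        (pvSV s.1 i j, true)
      else s) s

theorem pvPortB_eq (b : List (List Int)) (c : Int) :
    find_points_reachable_from_color_alt b c
      = pvLoop (b.length * b.length + 1) b c b.length (pvG0 b c b.length) := by
  unfold find_points_reachable_from_color_alt pvG0
  simp only [PySem.List.pyRange_zero_natCast, List.map_map, Function.comp_def]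

-- ---- adjacency, the spread condition, closedness ----

def pvCond (b : List (List Int)) (c : Int) (u w : Int × Int) : Bool :=
  (pvGB b w.1 w.2 == pvGB b u.1 u.2) || (pvGB b u.1 u.2 == c)

def pvAdj (u w : Int × Int) : Prop := w ∈ pvNbrs u.1 u.2

theorem pvAdj_symm {u w : Int × Int} (h : pvAdj u w) : pvAdj w u := by
  obtain ⟨a, b⟩ := u
  obtain ⟨x, y⟩ := w
  simp [pvAdj, pvNbrs, Prod.ext_iff] at h ⊢
  omega

theorem pvAdj_of_dir {x y : Int} {d : Int × Int} (hd : d ∈ pvDirs) :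
    pvAdj (x, y) (x + d.1, y + d.2) := by
  simp only [pvDirs, List.mem_cons, List.not_mem_nil, or_false] at hd
  rcases hd with rfl | rfl | rfl | rfl <;> (simp [pvAdj, pvNbrs, Prod.ext_iff]; try omega)

theorem pvAdj_dest {x y : Int} {w : Int × Int} (h : pvAdj (x, y) w) :
    ∃ d ∈ pvDirs, w = (x + d.1, y + d.2) := by
  simp only [pvAdj, pvNbrs, List.mem_cons, List.not_mem_nil, or_false] at h
  rcases h with rfl | rfl | rfl | rfl
  · exact ⟨(0, -1), by simp [pvDirs], by rw [Prod.mk.injEq]; omega⟩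
  · exact ⟨(1, 0), by simp [pvDirs], by rw [Prod.mk.injEq]; omega⟩
  · exact ⟨(0, 1), by simp [pvDirs], by rw [Prod.mk.injEq]; omega⟩
  · exact ⟨(-1, 0), by simp [pvDirs], by rw [Prod.mk.injEq]; omega⟩

def pvClosed (b : List (List Int)) (c : Int) (n : Nat) (v : List (List Bool)) : Prop :=
  ∀ u w : Int × Int, pvInB n u.1 u.2 → pvgv v u.1 u.2 = true → pvAdj u w →
    pvInB n w.1 w.2 → pvCond b c u w = true → pvgv v w.1 w.2 = true

def pvSeeds (b : List (List Int)) (c : Int) (n : Nat) (v : List (List Bool)) : Prop :=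
  ∀ x y : Int, pvInB n x y → (pvGB b x y == c) = true → pvgv v x y = true

-- a cell's spread obligations are all met in r
def pvCov (b : List (List Int)) (c : Int) (n : Nat) (r : List (List Bool)) (u : Int × Int) :
    Prop :=
  ∀ w : Int × Int, pvAdj u w → pvInB n w.1 w.2 → pvCond b c u w = true →
    pvgv r w.1 w.2 = true

theorem pvCov_mono {b c n r r' u} (hS : pvSub r r') (h : pvCov b c n r u) :
    pvCov b c n r' u := fun w h1 h2 h3 => hS w.1 w.2 (h w h1 h2 h3)

-- ---- properties of A's dfs: preservation, marking, soundness, closedness ----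

theorem pvA_pres (f : Nat) :
    (∀ (b : List (List Int)) (c : Int) (x y : Int) (v : List (List Bool)),
      pvPres v (pvDfs f x y v b c true)) ∧
    (∀ (b : List (List Int)) (c : Int) (x y : Int) (v : List (List Bool))
      (ds : List (Int × Int)), pvPres v (pvDfsNbrs f x y v b c true ds)) := by
  induction f with
  | zero =>
    have hd : ∀ b c x y v, pvPres v (pvDfs 0 x y v b c true) := by
      intro b c x y v
      rw [pvDfs]
      exact pvPres_refl v
    refine ⟨hd, ?_⟩
    intro b c x y v ds
    induction ds generalizing v with
    | nil => rw [pvDfsNbrs]; exact pvPres_refl v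
    | cons d ds ihds =>
      simp only [pvDfsNbrs]
      split_ifs with h
      · exact pvPres_trans (hd b c _ _ v) (ihds _)
      · exact ihds v
  | succ f ih =>
    have hd : ∀ b c x y v, pvPres v (pvDfs (f + 1) x y v b c true) := by
      intro b c x y v
      rw [pvDfs]
      split_ifs with h
      · rw [pvSV_eq v x y h.1 h.2.2.1]
        exact pvPres_trans (pvPres_pvsv v x y) (ih.2 b c x y _ pvDirs)
      · exact pvPres_refl v
    refine ⟨hd, ?_⟩
    intro b c x y v ds
    induction ds generalizing v with
    | nil => rw [pvDfsNbrs]; exact pvPres_refl v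
    | cons d ds ihds =>
      simp only [pvDfsNbrs]
      split_ifs with h
      · exact pvPres_trans (hd b c _ _ v) (ihds _)
      · exact ihds v

theorem pvDfs_marks {f : Nat} {b : List (List Int)} {c : Int} {n : Nat} {x y : Int}
    {v : List (List Bool)} (hf : 0 < f) (hS : pvShape n v) (hI : pvInB n x y) :
    pvgv (pvDfs f x y v b c true) x y = true := by
  obtain ⟨f, rfl⟩ : ∃ f', f = f' + 1 := ⟨f - 1, by omega⟩
  rw [pvDfs]
  by_cases hv : pvgv v x y = true
  · split_ifs with h
    · have : pvGV v x y = true := by rw [pvGV_eq v x y h.1 h.2.2.1]; exact hv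
      rw [h.2.2.2.2] at this
      exact absurd this (by simp)
    · exact hv
  · obtain ⟨hx0, hxlt, hy0, hylt⟩ := hI
    have hxl : x.toNat < v.length := by rw [hS.1]; omega
    have hyl : y.toNat < (v.getD x.toNat []).length := by
      rw [hS.2 x.toNat (by omega)]; omega
    rw [if_pos ⟨hx0, hxl, hy0, hyl, by rw [pvGV_eq v x y hx0 hy0]; simpa using hv⟩]
    rw [pvSV_eq v x y hx0 hy0]
    exact ((pvA_pres f).2 b c x y _ pvDirs).1 x y (pvgv_pvsv_self hxl hyl)

theorem pvA_sound (f : Nat) :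
    (∀ (b : List (List Int)) (c : Int) (n : Nat) (T v : List (List Bool)) (x y : Int),
      pvClosed b c n T → pvShape n v → pvSub v T → (pvInB n x y → pvgv T x y = true) →
      pvSub (pvDfs f x y v b c true) T) ∧
    (∀ (b : List (List Int)) (c : Int) (n : Nat) (T v : List (List Bool)) (x y : Int)
      (ds : List (Int × Int)), pvClosed b c n T → pvShape n v → pvSub v T →
      (∀ d ∈ ds, d ∈ pvDirs) → pvInB n x y → pvgv T x y = true →
      pvSub (pvDfsNbrs f x y v b c true ds) T) := by
  induction f with
  | zero =>
    have hd : ∀ b c n T v x y, pvClosed b c n T → pvShape n v → pvSub v T →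
        (pvInB n x y → pvgv T x y = true) → pvSub (pvDfs 0 x y v b c true) T := by
      intro b c n T v x y _ _ hSub _
      rw [pvDfs]
      exact hSub
    refine ⟨fun b c n T v x y => hd b c n T v x y, ?_⟩
    intro b c n T v x y ds hC hS hSub hds hI hT
    have main : ∀ ds', (∀ e ∈ ds', e ∈ pvDirs) → ∀ w, pvShape n w → pvSub w T →
        pvSub (pvDfsNbrs 0 x y w b c true ds') T := by
      intro ds'
      induction ds' with
      | nil => intro _ w _ hSub'; rw [pvDfsNbrs]; exact hSub'
      | cons d ds' ihds =>
        intro hds' w hSw hSub'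
        simp only [pvDfsNbrs]
        split_ifs with h
        · rw [pvDfs]
          exact ihds (fun e he => hds' e (List.mem_cons_of_mem d he)) w hSw hSub'
        · exact ihds (fun e he => hds' e (List.mem_cons_of_mem d he)) w hSw hSub'
    exact main ds hds v hS hSub
  | succ f ih =>
    have hd : ∀ b c n T v x y, pvClosed b c n T → pvShape n v → pvSub v T →
        (pvInB n x y → pvgv T x y = true) → pvSub (pvDfs (f + 1) x y v b c true) T := by
      intro b c n T v x y hC hS hSub hIn
      rw [pvDfs]
      split_ifs with h
      · have hInB : pvInB n x y := by
          obtain ⟨hx0, hxl, hy0, hyl, -⟩ := h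
          rw [hS.1] at hxl
          rw [hS.2 x.toNat hxl] at hyl
          exact ⟨hx0, by omega, hy0, by omega⟩
        have hT := hIn hInB
        rw [pvSV_eq v x y h.1 h.2.2.1]
        exact ih.2 b c n T _ x y pvDirs hC
          (pvShape_of_pres hS (pvPres_pvsv v x y))
          (pvSub_sv_of_mem hSub hT) (fun _ he => he) hInB hT
      · exact hSub
    refine ⟨fun b c n T v x y => hd b c n T v x y, ?_⟩
    intro b c n T v x y ds hC hS hSub hds hI hT
    have main : ∀ ds', (∀ e ∈ ds', e ∈ pvDirs) → ∀ w, pvShape n w → pvSub w T →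
        pvSub (pvDfsNbrs (f + 1) x y w b c true ds') T := by
      intro ds'
      induction ds' with
      | nil => intro _ w _ hSub'; rw [pvDfsNbrs]; exact hSub'
      | cons d ds' ihds =>
        intro hds' w hSw hSub'
        simp only [pvDfsNbrs]
        split_ifs with h
        · have hdd : d ∈ pvDirs := hds' d List.mem_cons_self
          have hlen : PySem.List.len w = (n : Int) := by
            rw [PySem.List.len_eq, hSw.1]
          rw [hlen] at h
          have hInB2 : pvInB n (x + d.1) (y + d.2) := ⟨h.1, h.2.1, h.2.2.1, h.2.2.2.1⟩
          have hcond : pvCond b c (x, y) (x + d.1, y + d.2) = true := by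
            have := h.2.2.2.2.2
            simpa [pvCond, Bool.true_and] using this
          have hTnew : pvgv T (x + d.1) (y + d.2) = true :=
            hC (x, y) (x + d.1, y + d.2) hI hT (pvAdj_of_dir hdd) hInB2 hcond
          exact ihds (fun e he => hds' e (List.mem_cons_of_mem d he)) _
            (pvShape_of_pres hSw ((pvA_pres (f + 1)).1 b c _ _ w))
            (hd b c n T w _ _ hC hSw hSub' (fun _ => hTnew))
        · exact ihds (fun e he => hds' e (List.mem_cons_of_mem d he)) w hSw hSub'
    exact main ds hds v hS hSub

theorem pvA_closed (f : Nat) :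
    (∀ (b : List (List Int)) (c : Int) (n : Nat) (x y : Int) (v : List (List Bool)),
      pvShape n v → pvCf v < f →
      ∀ a a' : Int, pvInB n a a' → pvgv (pvDfs f x y v b c true) a a' = true →
        pvgv v a a' = true ∨ pvCov b c n (pvDfs f x y v b c true) (a, a')) ∧
    (∀ (b : List (List Int)) (c : Int) (n : Nat) (x y : Int) (v : List (List Bool))
      (ds : List (Int × Int)), pvShape n v → pvCf v < f → (∀ e ∈ ds, e ∈ pvDirs) →
      pvInB n x y →
      (∀ a a' : Int, pvInB n a a' → pvgv (pvDfsNbrs f x y v b c true ds) a a' = true →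
        pvgv v a a' = true ∨ pvCov b c n (pvDfsNbrs f x y v b c true ds) (a, a')) ∧
      (∀ d ∈ ds, pvInB n (x + d.1) (y + d.2) →
        pvCond b c (x, y) (x + d.1, y + d.2) = true →
        pvgv (pvDfsNbrs f x y v b c true ds) (x + d.1) (y + d.2) = true)) := by
  induction f with
  | zero =>
    exact ⟨fun b c n x y v _ hcf => absurd hcf (by omega),
      fun b c n x y v ds _ hcf => absurd hcf (by omega)⟩
  | succ f ih =>
    have hd : ∀ (b : List (List Int)) (c : Int) (n : Nat) (x y : Int) (v : List (List Bool)),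
        pvShape n v → pvCf v < f + 1 →
        ∀ a a' : Int, pvInB n a a' → pvgv (pvDfs (f + 1) x y v b c true) a a' = true →
          pvgv v a a' = true ∨ pvCov b c n (pvDfs (f + 1) x y v b c true) (a, a') := by
      intro b c n x y v hS hcf a a' hIa hm
      rw [pvDfs] at hm ⊢
      split_ifs at hm ⊢ with h
      · obtain ⟨hx0, hxl, hy0, hyl, hgv⟩ := h
        rw [pvSV_eq v x y hx0 hy0] at hm ⊢
        have hfalse : pvgv v x y = false := by
          rw [← pvGV_eq v x y hx0 hy0]; exact hgv
        have hlt := pvCf_pvsv_lt hxl hyl hfalse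
        have hcf1 : pvCf (pvsv v x y) < f := by omega
        have hS1 := pvShape_of_pres hS (pvPres_pvsv v x y)
        have hInB : pvInB n x y := by
          have hxl' := hxl
          rw [hS.1] at hxl'
          have hyl' := hyl
          rw [hS.2 x.toNat hxl'] at hyl'
          exact ⟨hx0, by omega, hy0, by omega⟩
        obtain ⟨hnew, hcov⟩ :=
          ih.2 b c n x y (pvsv v x y) pvDirs hS1 hcf1 (fun e he => he) hInB
        rcases hnew a a' hIa hm with hv1 | hCov
        · rcases pvgv_pvsv_cases hv1 with hv | ⟨hna, hnb⟩
          · exact Or.inl hv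
          · have hax : a = x := by
              have := hIa.1
              omega
            have hay : a' = y := by
              have := hIa.2.2.1
              omega
            subst hax
            subst hay
            right
            intro w hadj hIw hcw
            obtain ⟨d, hdd, rfl⟩ := pvAdj_dest hadj
            exact hcov d hdd hIw hcw
        · exact Or.inr hCov
      · exact Or.inl hm
    refine ⟨hd, ?_⟩
    intro b c n x y v ds hS hcf hds hI
    have main : ∀ ds', (∀ e ∈ ds', e ∈ pvDirs) → ∀ w, pvShape n w → pvCf w < f + 1 →
        (∀ a a' : Int, pvInB n a a' → pvgv (pvDfsNbrs (f + 1) x y w b c true ds') a a' = true →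
          pvgv w a a' = true ∨ pvCov b c n (pvDfsNbrs (f + 1) x y w b c true ds') (a, a')) ∧
        (∀ d ∈ ds', pvInB n (x + d.1) (y + d.2) →
          pvCond b c (x, y) (x + d.1, y + d.2) = true →
          pvgv (pvDfsNbrs (f + 1) x y w b c true ds') (x + d.1) (y + d.2) = true) := by
      intro ds'
      induction ds' with
      | nil =>
        intro _ w _ _
        rw [pvDfsNbrs]
        exact ⟨fun a a' _ hm => Or.inl hm, fun d hd' => absurd hd' (by simp)⟩
      | cons d ds' ihds =>
        intro hds' w hSw hcfw
        simp only [pvDfsNbrs]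
        split_ifs with h
        · have hPres2 := (pvA_pres (f + 1)).1 b c (x + d.1) (y + d.2) w
          have hS2 := pvShape_of_pres hSw hPres2
          have hcf2 : pvCf (pvDfs (f + 1) (x + d.1) (y + d.2) w b c true) < f + 1 :=
            lt_of_le_of_lt hPres2.2.1 hcfw
          obtain ⟨hnew2, hcov2⟩ := ihds (fun e he => hds' e (List.mem_cons_of_mem d he)) _
            hS2 hcf2
          have hPresR := (pvA_pres (f + 1)).2 b c x y
            (pvDfs (f + 1) (x + d.1) (y + d.2) w b c true) ds'
          constructor
          · intro a a' hIa hm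
            rcases hnew2 a a' hIa hm with hv2 | hcovR
            · rcases hd b c n (x + d.1) (y + d.2) w hSw hcfw a a' hIa hv2 with hv | hcovC
              · exact Or.inl hv
              · exact Or.inr (pvCov_mono hPresR.1 hcovC)
            · exact Or.inr hcovR
          · intro e he hIe hce
            rcases List.mem_cons.1 he with rfl | hmem
            · exact hPresR.1 _ _ (pvDfs_marks (Nat.succ_pos f) hSw hIe)
            · exact hcov2 e hmem hIe hce
        · obtain ⟨hnew2, hcov2⟩ := ihds (fun e he => hds' e (List.mem_cons_of_mem d he)) w
            hSw hcfw
          refine ⟨hnew2, ?_⟩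
          intro e he hIe hce
          rcases List.mem_cons.1 he with rfl | hmem
          · have hvnew : pvgv w (x + e.1) (y + e.2) = true := by
              by_contra hno
              apply h
              have hlen : PySem.List.len w = (n : Int) := by
                rw [PySem.List.len_eq, hSw.1]
              refine ⟨hIe.1, ?_, hIe.2.2.1, ?_, ?_, ?_⟩
              · rw [hlen]; exact hIe.2.1
              · rw [hlen]; exact hIe.2.2.2
              · rw [pvGV_eq w _ _ hIe.1 hIe.2.2.1]
                simpa using hno
              · simpa [pvCond, Bool.true_and] using hce
            exact ((pvA_pres (f + 1)).2 b c x y w ds').1 _ _ hvnew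
          · exact hcov2 e hmem hIe hce
    exact main ds hds v hS hcf

-- ---- A's outer double loop over all cells ----

theorem pvStepA_pres (b : List (List Int)) (c : Int) (n : Nat) (v : List (List Bool))
    (p : Nat × Nat) : pvPres v (pvStepA b c n v p) := by
  unfold pvStepA
  split_ifs with h
  · exact (pvA_pres (n * n + 1)).1 b c _ _ v
  · exact pvPres_refl v

theorem pvFoldA_pres (b : List (List Int)) (c : Int) (n : Nat) :
    ∀ (L : List (Nat × Nat)) (v : List (List Bool)),
      pvPres v (L.foldl (pvStepA b c n) v) := by
  intro L
  induction L with
  | nil => exact fun v => pvPres_refl v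
  | cons p L ih =>
    intro v
    rw [List.foldl_cons]
    exact pvPres_trans (pvStepA_pres b c n v p) (ih _)

theorem pvInB_of_lt {n : Nat} {p : Nat × Nat} (h1 : p.1 < n) (h2 : p.2 < n) :
    pvInB n (p.1 : Int) (p.2 : Int) :=
  ⟨Int.natCast_nonneg _, by omega, Int.natCast_nonneg _, by omega⟩

theorem pvFoldA_sound (b : List (List Int)) (c : Int) (n : Nat) (T : List (List Bool))
    (hC : pvClosed b c n T) (hSeeds : pvSeeds b c n T) :
    ∀ L : List (Nat × Nat), (∀ p ∈ L, p.1 < n ∧ p.2 < n) →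
      ∀ v, pvShape n v → pvSub v T → pvSub (L.foldl (pvStepA b c n) v) T := by
  intro L
  induction L with
  | nil => exact fun _ v _ h => h
  | cons p L ih =>
    intro hb v hS hSub
    rw [List.foldl_cons]
    have hstep : pvSub (pvStepA b c n v p) T := by
      unfold pvStepA
      split_ifs with hcond
      · exact (pvA_sound (n * n + 1)).1 b c n T v p.1 p.2 hC hS hSub
          (fun _ => hSeeds p.1 p.2
            (pvInB_of_lt (hb p List.mem_cons_self).1 (hb p List.mem_cons_self).2) hcond.1)
      · exact hSub
    exact ih (fun q hq => hb q (List.mem_cons_of_mem p hq)) _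
      (pvShape_of_pres hS (pvStepA_pres b c n v p)) hstep

theorem pvStepA_closed (b : List (List Int)) (c : Int) (n : Nat) (v : List (List Bool))
    (p : Nat × Nat) (hS : pvShape n v) (hC : pvClosed b c n v) :
    pvClosed b c n (pvStepA b c n v p) := by
  unfold pvStepA
  split_ifs with hcond
  · intro u w hIu hmu hadj hIw hcw
    have hcf : pvCf v < n * n + 1 := by
      have := pvCf_le_sq hS
      omega
    rcases (pvA_closed (n * n + 1)).1 b c n p.1 p.2 v hS hcf u.1 u.2 hIu
        (by simpa using hmu) with hv | hcov
    · exact ((pvA_pres (n * n + 1)).1 b c _ _ v).1 w.1 w.2 (hC u w hIu hv hadj hIw hcw)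
    · simpa using hcov w hadj hIw hcw
  · exact hC

theorem pvFoldA_closed (b : List (List Int)) (c : Int) (n : Nat) :
    ∀ L : List (Nat × Nat), ∀ v, pvShape n v → pvClosed b c n v →
      pvClosed b c n (L.foldl (pvStepA b c n) v) := by
  intro L
  induction L with
  | nil => exact fun v _ h => h
  | cons p L ih =>
    intro v hS hC
    rw [List.foldl_cons]
    exact ih _ (pvShape_of_pres hS (pvStepA_pres b c n v p)) (pvStepA_closed b c n v p hS hC)

theorem pvFoldA_marks (b : List (List Int)) (c : Int) (n : Nat) :
    ∀ L : List (Nat × Nat), (∀ p ∈ L, p.1 < n ∧ p.2 < n) →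
      ∀ v, pvShape n v → ∀ p ∈ L, (pvGB b p.1 p.2 == c) = true →
        pvgv (L.foldl (pvStepA b c n) v) p.1 p.2 = true := by
  intro L
  induction L with
  | nil => intro _ v _ p hp; exact absurd hp (by simp)
  | cons q L ih =>
    intro hb v hS p hp hseed
    rw [List.foldl_cons]
    rcases List.mem_cons.1 hp with rfl | hmem
    · have hq : pvgv (pvStepA b c n v p) p.1 p.2 = true := by
        unfold pvStepA
        split_ifs with hcond
        · exact pvDfs_marks (by omega) hS
            (pvInB_of_lt (hb p List.mem_cons_self).1 (hb p List.mem_cons_self).2)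
        · have hv : pvGV v p.1 p.2 = true := by
            cases hgv : pvGV v (p.1 : Int) (p.2 : Int)
            · exact absurd ⟨hseed, hgv⟩ hcond
            · rfl
          rw [pvGV_eq _ _ _ (Int.natCast_nonneg _) (Int.natCast_nonneg _)] at hv
          exact hv
      exact (pvFoldA_pres b c n L _).1 _ _ hq
    · exact ih (fun r hr => hb r (List.mem_cons_of_mem q hr)) _
        (pvShape_of_pres hS (pvStepA_pres b c n v q)) p hmem hseed

-- ---- the two initial grids ----

theorem pvGetD_out {α : Type} (l : List α) (k : Nat) (d : α) (h : l.length ≤ k) :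
    l.getD k d = d := by
  rw [List.getD_eq_getElem?_getD, List.getElem?_eq_none h]
  rfl

theorem pvV0_shape (n : Nat) : pvShape n (pvV0 n) := by
  refine ⟨by simp [pvV0], ?_⟩
  intro k hk
  rw [pvV0, PySem.List.getD_map_range _ _ _ _ hk]
  simp

theorem pvV0_gv (n : Nat) (x y : Int) : pvgv (pvV0 n) x y = false := by
  unfold pvgv pvV0
  by_cases hx : x.toNat < n
  · rw [PySem.List.getD_map_range _ _ _ _ hx]
    by_cases hy : y.toNat < n
    · rw [PySem.List.getD_map_range _ _ _ _ hy]
    · rw [pvGetD_out _ _ _ (by simpa using hy)]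
  · rw [pvGetD_out ((List.range n).map (fun _ => (List.range n).map (fun _ => false)))
      x.toNat [] (by simpa using hx)]
    rfl

theorem pvG0_shape (b : List (List Int)) (c : Int) (n : Nat) : pvShape n (pvG0 b c n) := by
  refine ⟨by simp [pvG0], ?_⟩
  intro k hk
  rw [pvG0, PySem.List.getD_map_range _ _ _ _ hk]
  simp

theorem pvG0_seeds (b : List (List Int)) (c : Int) (n : Nat) : pvSeeds b c n (pvG0 b c n) := by
  intro x y hI hseed
  have hx : x.toNat < n := by obtain ⟨h1, h2, h3, h4⟩ := hI; omega
  have hy : y.toNat < n := by obtain ⟨h1, h2, h3, h4⟩ := hI; omega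
  unfold pvgv pvG0
  rw [PySem.List.getD_map_range _ _ _ _ hx, PySem.List.getD_map_range _ _ _ _ hy,
    Int.toNat_of_nonneg hI.1, Int.toNat_of_nonneg hI.2.2.1]
  exact hseed

theorem pvG0_sub (b : List (List Int)) (c : Int) (n : Nat) {x y : Int}
    (h : pvgv (pvG0 b c n) x y = true) :
    x.toNat < n ∧ y.toNat < n ∧ (pvGB b (x.toNat : Int) (y.toNat : Int) == c) = true := by
  unfold pvgv pvG0 at h
  by_cases hx : x.toNat < n
  · rw [PySem.List.getD_map_range _ _ _ _ hx] at h
    by_cases hy : y.toNat < n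
    · rw [PySem.List.getD_map_range _ _ _ _ hy] at h
      exact ⟨hx, hy, h⟩
    · rw [pvGetD_out _ _ _ (by simpa using hy)] at h
      simp at h
  · rw [pvGetD_out ((List.range n).map
        (fun i : Nat => (List.range n).map (fun j : Nat => pvGB b (i : Int) (j : Int) == c)))
        x.toNat [] (by simpa using hx)] at h
    simp at h

-- ---- B's sweep and fixed-point loop ----

theorem pvStepB_pres (b : List (List Int)) (c : Int) (n : Nat) (s : List (List Bool) × Bool)
    (p : Nat × Nat) : pvPres s.1 (pvStepB b c n s p).1 := by
  unfold pvStepB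
  split_ifs with h
  · rw [pvSV_eq _ _ _ (Int.natCast_nonneg _) (Int.natCast_nonneg _)]
    exact pvPres_pvsv s.1 _ _
  · exact pvPres_refl s.1

theorem pvStepB_flag (b : List (List Int)) (c : Int) (n : Nat) (s : List (List Bool) × Bool)
    (p : Nat × Nat) (h : s.2 = true) : (pvStepB b c n s p).2 = true := by
  unfold pvStepB
  split_ifs
  · rfl
  · exact h

theorem pvStepB_false {b : List (List Int)} {c : Int} {n : Nat} {s : List (List Bool) × Bool}
    {p : Nat × Nat} (h : (pvStepB b c n s p).2 = false) :
    pvStepB b c n s p = s ∧ s.2 = false := by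
  unfold pvStepB at h ⊢
  split_ifs at h ⊢ with hc
  exact ⟨rfl, h⟩

theorem pvFoldB_pres (b : List (List Int)) (c : Int) (n : Nat) :
    ∀ (L : List (Nat × Nat)) (s : List (List Bool) × Bool),
      pvPres s.1 (L.foldl (pvStepB b c n) s).1 := by
  intro L
  induction L with
  | nil => exact fun s => pvPres_refl s.1
  | cons p L ih =>
    intro s
    rw [List.foldl_cons]
    exact pvPres_trans (pvStepB_pres b c n s p) (ih _)

theorem pvFoldB_flag (b : List (List Int)) (c : Int) (n : Nat) :
    ∀ (L : List (Nat × Nat)) (s : List (List Bool) × Bool), s.2 = true →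
      (L.foldl (pvStepB b c n) s).2 = true := by
  intro L
  induction L with
  | nil => exact fun s h => h
  | cons p L ih =>
    intro s h
    rw [List.foldl_cons]
    exact ih _ (pvStepB_flag b c n s p h)

theorem pvFoldB_false (b : List (List Int)) (c : Int) (n : Nat) :
    ∀ (L : List (Nat × Nat)) (s : List (List Bool) × Bool),
      (L.foldl (pvStepB b c n) s).2 = false →
      L.foldl (pvStepB b c n) s = s ∧ ∀ p ∈ L, pvStepB b c n s p = s := by
  intro L
  induction L with
  | nil => exact fun s h => ⟨rfl, by simp⟩
  | cons p L ih =>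
    intro s h
    rw [List.foldl_cons] at h ⊢
    have hflag : (pvStepB b c n s p).2 = false := by
      cases hf : (pvStepB b c n s p).2
      · rfl
      · exact absurd (pvFoldB_flag b c n L _ hf) (by simp [h])
    obtain ⟨hsp, _⟩ := pvStepB_false hflag
    rw [hsp] at h ⊢
    obtain ⟨hfold, hall⟩ := ih s h
    refine ⟨hfold, ?_⟩
    intro q hq
    rcases List.mem_cons.1 hq with rfl | hmem
    · exact hsp
    · exact hall q hmem

theorem pvFoldB_lt (b : List (List Int)) (c : Int) (n : Nat) :
    ∀ (L : List (Nat × Nat)) (s : List (List Bool) × Bool), s.2 = false →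
      (L.foldl (pvStepB b c n) s).2 = true →
      pvCf (L.foldl (pvStepB b c n) s).1 < pvCf s.1 := by
  intro L
  induction L with
  | nil => intro s h1 h2; rw [List.foldl_nil] at h2; simp [h1] at h2
  | cons p L ih =>
    intro s h1 h2
    rw [List.foldl_cons] at h2 ⊢
    by_cases hs' : (pvStepB b c n s p).2 = true
    · have hlt : pvCf (pvStepB b c n s p).1 < pvCf s.1 := by
        unfold pvStepB at hs' ⊢
        split_ifs at hs' ⊢ with hc
        · obtain ⟨h01, hl1, h02, hl2, hgv, -⟩ := hc
          rw [pvSV_eq _ _ _ h01 h02]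
          exact pvCf_pvsv_lt (by simpa using hl1) (by simpa using hl2)
            (by rw [← pvGV_eq _ _ _ h01 h02]; exact hgv)
        · simp [h1] at hs'
      exact lt_of_le_of_lt (pvFoldB_pres b c n L _).2.1 hlt
    · have hflag : (pvStepB b c n s p).2 = false := by
        cases hf : (pvStepB b c n s p).2
        · rfl
        · exact absurd hf hs'
      obtain ⟨hsp, -⟩ := pvStepB_false hflag
      rw [hsp] at h2 ⊢
      exact ih s h1 h2

theorem pvFoldB_sound (b : List (List Int)) (c : Int) (n : Nat) (T : List (List Bool))
    (hC : pvClosed b c n T) :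
    ∀ L : List (Nat × Nat), (∀ p ∈ L, p.1 < n ∧ p.2 < n) →
      ∀ s : List (List Bool) × Bool, pvSub s.1 T →
      pvSub (L.foldl (pvStepB b c n) s).1 T := by
  intro L
  induction L with
  | nil => exact fun _ s h => h
  | cons p L ih =>
    intro hb s hSub
    rw [List.foldl_cons]
    have hstep : pvSub (pvStepB b c n s p).1 T := by
      unfold pvStepB
      split_ifs with hc
      · obtain ⟨h01, hl1, h02, hl2, hgv, hany⟩ := hc
        obtain ⟨q, hqmem, hq⟩ := List.any_eq_true.1 hany
        simp only [Bool.and_eq_true, decide_eq_true_eq] at hq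
        obtain ⟨⟨⟨⟨⟨hq1, hq2⟩, hq3⟩, hq4⟩, hqv⟩, hqc⟩ := hq
        have hqT : pvgv T q.1 q.2 := hSub q.1 q.2 (by rw [← pvGV_eq _ _ _ hq1 hq3]; exact hqv)
        have hqI : pvInB n q.1 q.2 := ⟨hq1, hq2, hq3, hq4⟩
        have hpI : pvInB n (p.1 : Int) (p.2 : Int) :=
          pvInB_of_lt (hb p List.mem_cons_self).1 (hb p List.mem_cons_self).2
        have hadj : pvAdj q ((p.1 : Int), (p.2 : Int)) :=
          pvAdj_symm (show pvAdj ((p.1 : Int), (p.2 : Int)) q from hqmem)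
        have hT : pvgv T (p.1 : Int) (p.2 : Int) = true :=
          hC q ((p.1 : Int), (p.2 : Int)) hqI hqT hadj hpI hqc
        rw [pvSV_eq _ _ _ h01 h02]
        exact pvSub_sv_of_mem hSub hT
      · exact hSub
    exact ih (fun q hq => hb q (List.mem_cons_of_mem p hq)) _ hstep

theorem pvCells_bounds (n : Nat) : ∀ p ∈ pvCells n, p.1 < n ∧ p.2 < n :=
  fun _ hp => mem_pvCells.1 hp

theorem pvLoop_pres (b : List (List Int)) (c : Int) (n : Nat) :
    ∀ (f : Nat) (v : List (List Bool)), pvPres v (pvLoop f b c n v) := by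
  intro f
  induction f with
  | zero => intro v; rw [pvLoop]; exact pvPres_refl v
  | succ f ih =>
    intro v
    rw [pvLoop]
    simp only [pvPassB_eq]
    split_ifs with h
    · exact pvPres_trans (pvFoldB_pres b c n (pvCells n) (v, false)) (ih _)
    · exact pvFoldB_pres b c n (pvCells n) (v, false)

theorem pvLoop_sound (b : List (List Int)) (c : Int) (n : Nat) (T : List (List Bool))
    (hC : pvClosed b c n T) :
    ∀ (f : Nat) (v : List (List Bool)), pvSub v T → pvSub (pvLoop f b c n v) T := by
  intro f
  induction f with
  | zero => intro v h; rw [pvLoop]; exact h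
  | succ f ih =>
    intro v hSub
    rw [pvLoop]
    simp only [pvPassB_eq]
    split_ifs with h
    · exact ih _ (pvFoldB_sound b c n T hC (pvCells n) (pvCells_bounds n) (v, false) hSub)
    · exact pvFoldB_sound b c n T hC (pvCells n) (pvCells_bounds n) (v, false) hSub

theorem pvLoop_fix (b : List (List Int)) (c : Int) (n : Nat) :
    ∀ (f : Nat) (v : List (List Bool)), pvCf v < f →
      (pvPass b c n (pvLoop f b c n v, false)).2 = false := by
  intro f
  induction f with
  | zero => intro v h; exact absurd h (by omega)
  | succ f ih =>
    intro v hcf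
    rw [pvLoop]
    by_cases hr : (pvPass b c n (v, false)).2 = true
    · rw [if_pos hr]
      apply ih
      have hlt : pvCf (pvPass b c n (v, false)).1 < pvCf v := by
        have := pvFoldB_lt b c n (pvCells n) (v, false) rfl (by rw [← pvPassB_eq]; exact hr)
        rw [← pvPassB_eq] at this
        simpa using this
      omega
    · have hr' : (pvPass b c n (v, false)).2 = false := by
        cases hf : (pvPass b c n (v, false)).2
        · rfl
        · exact absurd hf hr
      rw [if_neg hr]
      have hfix := (pvFoldB_false b c n (pvCells n) (v, false) (by rw [← pvPassB_eq]; exact hr')).1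
      rw [← pvPassB_eq] at hfix
      rw [show (pvPass b c n (v, false)).1 = v from congrArg Prod.fst hfix]
      exact hr'

theorem pvPass_false_closed (b : List (List Int)) (c : Int) (n : Nat)
    {v : List (List Bool)} (hS : pvShape n v)
    (h : (pvPass b c n (v, false)).2 = false) : pvClosed b c n v := by
  have hall := (pvFoldB_false b c n (pvCells n) (v, false) (by rw [← pvPassB_eq]; exact h)).2
  intro u w hIu hmu hadj hIw hcw
  by_contra hno
  have hw1 : ((w.1.toNat : Nat) : Int) = w.1 := Int.toNat_of_nonneg hIw.1
  have hw2 : ((w.2.toNat : Nat) : Int) = w.2 := Int.toNat_of_nonneg hIw.2.2.1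
  have hpmem : (w.1.toNat, w.2.toNat) ∈ pvCells n := by
    rw [mem_pvCells]
    constructor
    · have := hIw.2.1; simp; omega
    · have := hIw.2.2.2; simp; omega
  have hstep := hall (w.1.toNat, w.2.toNat) hpmem
  unfold pvStepB at hstep
  split_ifs at hstep with hg
  · exact absurd (congrArg Prod.snd hstep) (by simp)
  · apply hg
    simp only [hw1, hw2]
    obtain ⟨hu1, hu2, hu3, hu4⟩ := hIu
    obtain ⟨hb1, hb2, hb3, hb4⟩ := hIw
    refine ⟨hb1, ?_, hb3, ?_, ?_, ?_⟩
    · rw [hS.1]; omega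
    · rw [hS.2 w.1.toNat (by omega)]; omega
    · rw [pvGV_eq _ _ _ hb1 hb3]
      simpa using hno
    · refine List.any_eq_true.2 ⟨u, ?_, ?_⟩
      · exact pvAdj_symm hadj
      · simp only [Bool.and_eq_true, decide_eq_true_eq]
        refine ⟨⟨⟨⟨⟨hu1, hu2⟩, hu3⟩, hu4⟩, ?_⟩, ?_⟩
        · rw [pvGV_eq _ _ _ hu1 hu3]; exact hmu
        · exact hcw

-- ---- equal marked sets of equal shape give equal grids ----

theorem pvGrid_ext {n : Nat} {va vb : List (List Bool)} (hA : pvShape n va) (hB : pvShape n vb)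
    (h : ∀ i j : Nat, i < n → j < n →
      pvgv va (i : Int) (j : Int) = pvgv vb (i : Int) (j : Int)) : va = vb := by
  apply List.ext_getElem (by rw [hA.1, hB.1])
  intro i h1 h2
  have hin : i < n := by rw [← hA.1]; exact h1
  have hra : va[i].length = n := by rw [← List.getD_eq_getElem va [] h1]; exact hA.2 i hin
  have hrb : vb[i].length = n := by rw [← List.getD_eq_getElem vb [] h2]; exact hB.2 i hin
  apply List.ext_getElem (by rw [hra, hrb])
  intro j hj1 hj2
  have hjn : j < n := by rw [← hra]; exact hj1
  have hpt := h i j hin hjn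
  unfold pvgv at hpt
  rw [Int.toNat_natCast, Int.toNat_natCast, List.getD_eq_getElem va [] h1,
    List.getD_eq_getElem vb [] h2, List.getD_eq_getElem _ false hj1,
    List.getD_eq_getElem _ false hj2] at hpt
  exact hpt

-- ---- the verdict ----

theorem pvMain (b : List (List Int)) (c : Int) :
    find_points_reachable_from_color b c = find_points_reachable_from_color_alt b c := by
  rw [pvPortA_eq, pvPortB_eq]
  have hSV0 := pvV0_shape b.length
  have hSG0 := pvG0_shape b c b.length
  have hSA : pvShape b.length ((pvCells b.length).foldl (pvStepA b c b.length) (pvV0 b.length)) :=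
    pvShape_of_pres hSV0 (pvFoldA_pres b c b.length (pvCells b.length) (pvV0 b.length))
  have hSB : pvShape b.length
      (pvLoop (b.length * b.length + 1) b c b.length (pvG0 b c b.length)) :=
    pvShape_of_pres hSG0 (pvLoop_pres b c b.length (b.length * b.length + 1) (pvG0 b c b.length))
  have hCA : pvClosed b c b.length
      ((pvCells b.length).foldl (pvStepA b c b.length) (pvV0 b.length)) := by
    apply pvFoldA_closed b c b.length (pvCells b.length) (pvV0 b.length) hSV0
    intro u w _ hmu _ _ _
    rw [pvV0_gv] at hmu
    simp at hmu
  have hSeedsA : pvSeeds b c b.length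
      ((pvCells b.length).foldl (pvStepA b c b.length) (pvV0 b.length)) := by
    intro x y hI hseed
    obtain ⟨h1, h2, h3, h4⟩ := hI
    have hx' : ((x.toNat : Nat) : Int) = x := Int.toNat_of_nonneg h1
    have hy' : ((y.toNat : Nat) : Int) = y := Int.toNat_of_nonneg h3
    have := pvFoldA_marks b c b.length (pvCells b.length) (pvCells_bounds b.length)
      (pvV0 b.length) hSV0 (x.toNat, y.toNat) (mem_pvCells.2 ⟨by omega, by omega⟩)
      (by rw [hx', hy']; exact hseed)
    rwa [hx', hy'] at this
  have hfixB : (pvPass b c b.length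
      (pvLoop (b.length * b.length + 1) b c b.length (pvG0 b c b.length), false)).2 = false := by
    apply pvLoop_fix
    have := pvCf_le_sq hSG0
    omega
  have hCB := pvPass_false_closed b c b.length hSB hfixB
  have hSeedsB : pvSeeds b c b.length
      (pvLoop (b.length * b.length + 1) b c b.length (pvG0 b c b.length)) := by
    intro x y hI hseed
    exact (pvLoop_pres b c b.length (b.length * b.length + 1) (pvG0 b c b.length)).1 x y
      (pvG0_seeds b c b.length x y hI hseed)
  have hAB : pvSub ((pvCells b.length).foldl (pvStepA b c b.length) (pvV0 b.length))
      (pvLoop (b.length * b.length + 1) b c b.length (pvG0 b c b.length)) := by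
    apply pvFoldA_sound b c b.length _ hCB hSeedsB (pvCells b.length) (pvCells_bounds b.length)
      (pvV0 b.length) hSV0
    intro x y h
    rw [pvV0_gv] at h
    simp at h
  have hBA : pvSub (pvLoop (b.length * b.length + 1) b c b.length (pvG0 b c b.length))
      ((pvCells b.length).foldl (pvStepA b c b.length) (pvV0 b.length)) := by
    apply pvLoop_sound b c b.length _ hCA
    intro x y h
    obtain ⟨hx, hy, hseed⟩ := pvG0_sub b c b.length h
    have h2 := hSeedsA (x.toNat : Int) (y.toNat : Int)
      (pvInB_of_lt (p := (x.toNat, y.toNat)) hx hy) hseed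
    have hc := pvgv_congr
      (v := (pvCells b.length).foldl (pvStepA b c b.length) (pvV0 b.length))
      (x := x) (y := y) (x' := ((x.toNat : Nat) : Int)) (y' := ((y.toNat : Nat) : Int))
      (by omega) (by omega)
    rw [hc]
    exact h2
  apply pvGrid_ext hSA hSB
  intro i j hi hj
  cases hva : pvgv ((pvCells b.length).foldl (pvStepA b c b.length) (pvV0 b.length))
      (i : Int) (j : Int)
  · cases hvb : pvgv (pvLoop (b.length * b.length + 1) b c b.length (pvG0 b c b.length))
        (i : Int) (j : Int)
    · rfl
    · have := hBA (i : Int) (j : Int) hvb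
      rw [hva] at this
      simp at this
  · rw [hAB (i : Int) (j : Int) hva]

theorem find_points_reachable_from_color_spec : Claim_equal_find_points_reachable_from_color := by
  intro board color _hDom _hPre
  unfold Spec_find_points_reachable_from_color
  exact pvMain board color
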